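-- pv_equiv track=rewrite | github.com/lexuv2/DC25-War-Ministry | parser/src/parser.py | _capitilize_fullname
-- ===== SOURCE A (Python) =====
-- def _capitilize_fullname(name: str) -> str:
--     words = name.split(" ")
--     result = []
--     for word in words:
--         if "-" in word:
--             capitalized = [w.capitalize() for w in word.split("-")]
--             result.append("-".join(capitalized))
--             continue
--         result.append(word.capitalize())
--     return " ".join(result)
-- ===== SOURCE B (Python) =====
-- def _capitilize_fullname(name: str) -> str:
--     out = []
--     at_start = True
--     for ch in name:
--         if ch == ' ' or ch == '-':
--             out.append(ch)
--             at_start = True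
--         else:
--             out.append(ch.upper() if at_start else ch.lower())
--             at_start = False
--     return "".join(out)
-- ===== Notes on version B (the rewrite author's own statement) =====
-- stated objective: simpler
-- what changed: Replaced the two-level split-on-space / conditional split-on-hyphen / join pipeline by a single left-to-right scan with a word-start flag that uppercases the first character after any delimiter and lowercases the rest.
import Mathlib
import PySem

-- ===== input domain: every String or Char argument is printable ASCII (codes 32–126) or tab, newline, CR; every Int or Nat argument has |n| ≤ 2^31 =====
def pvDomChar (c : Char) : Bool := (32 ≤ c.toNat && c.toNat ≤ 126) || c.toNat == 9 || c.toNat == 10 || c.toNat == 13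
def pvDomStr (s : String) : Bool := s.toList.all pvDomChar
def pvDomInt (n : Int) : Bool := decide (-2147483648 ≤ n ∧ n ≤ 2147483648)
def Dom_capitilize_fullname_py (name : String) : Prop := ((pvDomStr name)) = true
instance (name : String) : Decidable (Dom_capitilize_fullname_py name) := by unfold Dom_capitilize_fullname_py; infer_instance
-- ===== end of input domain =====

-- B replaces A's split-on-space / split-on-hyphen / join pipeline by one scan with a
-- word-start flag (objective: simpler).

-- ===== PORT A =====
-- w.capitalize(): first char uppercased, rest lowercased — exact on the ASCII domain
def pvCapA (w : List Char) : List Char :=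
  match w with
  | [] => []
  | c :: r => PySem.Chars.upperChar c :: PySem.Chars.lower r

def capitilize_fullname_py (name : String) : String :=
  let words := PySem.Chars.splitOn name.toList [' ']
  let result : List (List Char) := words.foldl (fun result word =>
    if PySem.Chars.isIn ['-'] word then
      let capitalized := (PySem.Chars.splitOn word ['-']).map pvCapA
      result ++ [PySem.Chars.join ['-'] capitalized]
    else
      result ++ [pvCapA word]) []
  String.ofList (PySem.Chars.join [' '] result)

-- ===== PORT B =====
def capitilize_fullname_py_alt (name : String) : String :=
  String.ofList ((name.toList.foldl (fun (st : List Char × Bool) ch =>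
      if ch = ' ' ∨ ch = '-' then (st.1 ++ [ch], true)
      else (st.1 ++ [if st.2 then PySem.Chars.upperChar ch else PySem.Chars.lowerChar ch], false))
    ([], true)).1)

-- ===== PRECONDITION & SPEC =====
def Spec_capitilize_fullname_py (name : String) (out : String) : Prop := out = capitilize_fullname_py_alt name
instance (name : String) (out : String) : Decidable (Spec_capitilize_fullname_py name out) := by unfold Spec_capitilize_fullname_py; infer_instance

-- ===== CLAIM (what is proved, stated in full; the proofs are below) =====
def Claim_equal_capitilize_fullname_py : Prop := ∀ (name : String), Dom_capitilize_fullname_py name → Spec_capitilize_fullname_py name (capitilize_fullname_py name)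

-- ===== LEMMAS AND PROOFS =====

-- the single-pass capitalizer as a structural recursion (B's loop body)
def pvOp : List Char → Bool → List Char
  | [], _ => []
  | c :: cs, b =>
      if c = ' ' ∨ c = '-' then c :: pvOp cs true
      else (if b then PySem.Chars.upperChar c else PySem.Chars.lowerChar c) :: pvOp cs false

-- a simple structural split on one delimiter character
def pvSplit (d : Char) : List Char → List (List Char)
  | [] => [[]]
  | c :: cs =>
      if c = d then [] :: pvSplit d cs
      else
        match pvSplit d cs with
        | [] => [[c]]
        | p :: ps => (c :: p) :: ps

theorem pvSplit_ne_nil (d : Char) (cs : List Char) : pvSplit d cs ≠ [] := by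
  cases cs with
  | nil => simp [pvSplit]
  | cons c cs =>
    simp only [pvSplit]
    split_ifs
    · simp
    · cases h : pvSplit d cs <;> simp

-- B's foldl from any state = accumulated prefix ++ pvOp
theorem pvFoldl_eq_op (cs : List Char) (acc : List Char) (b : Bool) :
    (cs.foldl (fun (st : List Char × Bool) ch =>
      if ch = ' ' ∨ ch = '-' then (st.1 ++ [ch], true)
      else (st.1 ++ [if st.2 then PySem.Chars.upperChar ch else PySem.Chars.lowerChar ch], false))
      (acc, b)).1 = acc ++ pvOp cs b := by
  induction cs generalizing acc b with
  | nil => simp [pvOp]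
  | cons c cs ih =>
    by_cases h : c = ' ' ∨ c = '-'
    · simp [pvOp, h, ih]
    · simp [pvOp, h, ih]

-- PySem.Chars.splitOn with a one-character separator is pvSplit
def pvConsHead (x : List Char) : List (List Char) → List (List Char)
  | [] => [x]
  | p :: ps => (x ++ p) :: ps

theorem pvSplitOn_go (d : Char) (fuel : Nat) (l cur : List Char) (acc : List (List Char))
    (h : l.length ≤ fuel) :
    PySem.Chars.splitOn.go [d] fuel l cur acc
      = acc.reverse ++ pvConsHead cur.reverse (pvSplit d l) := by
  induction l generalizing fuel cur acc with
  | nil =>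
    cases fuel <;> simp [PySem.Chars.splitOn.go, pvSplit, pvConsHead]
  | cons c cs ih =>
    cases fuel with
    | zero => simp at h
    | succ f =>
      simp only [List.length_cons, Nat.succ_le_succ_iff] at h
      by_cases hcd : c = d
      · subst hcd
        have hpre : List.isPrefixOf [c] (c :: cs) = true := by
          simp [List.isPrefixOf]
        simp only [PySem.Chars.splitOn.go, hpre, if_true, List.length, List.drop]
        rw [ih f [] (cur.reverse :: acc) h]
        simp [pvSplit]
        cases hs : pvSplit c cs with
        | nil => exact absurd hs (pvSplit_ne_nil c cs)
        | cons p ps => simp [pvConsHead]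
      · have hpre : List.isPrefixOf [d] (c :: cs) = false := by
          simp [List.isPrefixOf]
          intro hdc; exact hcd hdc.symm
        simp only [PySem.Chars.splitOn.go, hpre, Bool.false_eq_true, if_false]
        rw [ih f (c :: cur) acc h]
        simp only [pvSplit, hcd, if_false]
        cases hs : pvSplit d cs with
        | nil => exact absurd hs (pvSplit_ne_nil d cs)
        | cons p ps => simp [pvConsHead, List.append_assoc]

theorem pvSplitOn_eq (d : Char) (cs : List Char) :
    PySem.Chars.splitOn cs [d] = pvSplit d cs := by
  unfold PySem.Chars.splitOn
  rw [pvSplitOn_go d (cs.length + 1) cs [] [] (by omega)]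
  cases hs : pvSplit d cs with
  | nil => exact absurd hs (pvSplit_ne_nil d cs)
  | cons p ps => simp [pvConsHead]

theorem pvSplit_not_mem (d : Char) (cs : List Char) : ∀ p ∈ pvSplit d cs, d ∉ p := by
  induction cs with
  | nil => simp [pvSplit]
  | cons c cs ih =>
    intro p hp
    by_cases h : c = d
    · rw [pvSplit, if_pos h] at hp
      rcases List.mem_cons.mp hp with rfl | hp
      · simp
      · exact ih p hp
    · rw [pvSplit, if_neg h] at hp
      cases hs : pvSplit d cs with
      | nil => exact absurd hs (pvSplit_ne_nil d cs)
      | cons q qs =>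
        rw [hs] at hp
        rcases List.mem_cons.mp hp with rfl | hp
        · intro hmem
          rcases List.mem_cons.mp hmem with h1 | h1
          · exact h h1.symm
          · exact ih q (hs ▸ List.mem_cons_self ..) h1
        · exact ih p (hs ▸ List.mem_cons_of_mem q hp)

theorem pvSplit_mem_sub (d : Char) (cs : List Char) :
    ∀ p ∈ pvSplit d cs, ∀ x ∈ p, x ∈ cs := by
  induction cs with
  | nil => simp [pvSplit]
  | cons c cs ih =>
    intro p hp x hx
    by_cases h : c = d
    · rw [pvSplit, if_pos h] at hp
      rcases List.mem_cons.mp hp with rfl | hp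
      · simp at hx
      · exact List.mem_cons_of_mem c (ih p hp x hx)
    · rw [pvSplit, if_neg h] at hp
      cases hs : pvSplit d cs with
      | nil => exact absurd hs (pvSplit_ne_nil d cs)
      | cons q qs =>
        rw [hs] at hp
        rcases List.mem_cons.mp hp with rfl | hp
        · rcases List.mem_cons.mp hx with rfl | h1
          · simp
          · exact List.mem_cons_of_mem c (ih q (hs ▸ List.mem_cons_self ..) x h1)
        · exact List.mem_cons_of_mem c (ih p (hs ▸ List.mem_cons_of_mem q hp) x hx)

theorem pvSplit_of_not_mem (d : Char) (cs : List Char) (h : d ∉ cs) :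
    pvSplit d cs = [cs] := by
  induction cs with
  | nil => simp [pvSplit]
  | cons c cs ih =>
    simp only [List.mem_cons, not_or] at h
    have hcd : ¬ c = d := fun hx => h.1 hx.symm
    simp [pvSplit, hcd, ih h.2]

theorem pvJoin_singleton (d : Char) (p : List Char) :
    PySem.Chars.join [d] [p] = p := by
  simp [PySem.Chars.join, List.intercalate, List.intersperse]

theorem pvJoin_cons_cons (d : Char) (p q : List Char) (ps : List (List Char)) :
    PySem.Chars.join [d] (p :: q :: ps) = p ++ d :: PySem.Chars.join [d] (q :: ps) := by
  simp [PySem.Chars.join, List.intercalate, List.intersperse]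

theorem pvJoin_split (d : Char) (cs : List Char) :
    PySem.Chars.join [d] (pvSplit d cs) = cs := by
  induction cs with
  | nil => simp [pvSplit, PySem.Chars.join, List.intercalate]
  | cons c cs ih =>
    by_cases h : c = d
    · subst h
      simp only [pvSplit, if_true]
      cases hs : pvSplit c cs with
      | nil => exact absurd hs (pvSplit_ne_nil c cs)
      | cons p ps =>
        rw [pvJoin_cons_cons]
        rw [hs] at ih
        simp [ih]
    · simp only [pvSplit, h, if_false]
      cases hs : pvSplit d cs with
      | nil => exact absurd hs (pvSplit_ne_nil d cs)
      | cons p ps =>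
        rw [hs] at ih
        cases ps with
        | nil =>
          simp [PySem.Chars.join, List.intercalate] at ih ⊢
          simp [ih]
        | cons q qs =>
          rw [pvJoin_cons_cons] at ih
          rw [pvJoin_cons_cons]
          simp [← ih]

-- isIn with a singleton pattern is membership
theorem pvIsIn_singleton (d : Char) (cs : List Char) :
    PySem.Chars.isIn [d] cs = true ↔ d ∈ cs := by
  rw [PySem.Chars.isIn_iff_infix]
  constructor
  · rintro ⟨s, t, h⟩
    exact h ▸ (by simp)
  · intro h
    rcases List.append_of_mem h with ⟨s, t, rfl⟩
    exact ⟨s, t, by simp⟩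

-- pvOp ignores the flag when the rest is empty or starts with a delimiter
theorem pvOp_flag_irrel (t : List Char)
    (ht : t = [] ∨ ∃ c t', t = c :: t' ∧ (c = ' ' ∨ c = '-')) (b b' : Bool) :
    pvOp t b = pvOp t b' := by
  rcases ht with rfl | ⟨c, t', rfl, hc⟩
  · rfl
  · simp [pvOp, hc]

-- scanning a delimiter-free word lowercases it (flag false)
theorem pvOp_word_false (w t : List Char) (hw : ∀ x ∈ w, ¬(x = ' ' ∨ x = '-'))
    (ht : t = [] ∨ ∃ c t', t = c :: t' ∧ (c = ' ' ∨ c = '-')) :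
    pvOp (w ++ t) false = PySem.Chars.lower w ++ pvOp t true := by
  induction w with
  | nil =>
    simp [PySem.Chars.lower]
    exact pvOp_flag_irrel t ht false true
  | cons c w ih =>
    have hc := hw c (List.mem_cons_self ..)
    simp only [List.cons_append, pvOp, hc, if_false, PySem.Chars.lower, List.map]
    rw [ih (fun x hx => hw x (List.mem_cons_of_mem c hx))]
    simp [PySem.Chars.lower]

-- scanning a delimiter-free word capitalizes it (flag true)
theorem pvOp_word_true (w t : List Char) (hw : ∀ x ∈ w, ¬(x = ' ' ∨ x = '-'))
    (ht : t = [] ∨ ∃ c t', t = c :: t' ∧ (c = ' ' ∨ c = '-')) :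
    pvOp (w ++ t) true = pvCapA w ++ pvOp t true := by
  cases w with
  | nil =>
    simp [pvCapA]
  | cons c w =>
    have hc := hw c (List.mem_cons_self ..)
    simp only [List.cons_append, pvOp, hc, if_false, if_true, pvCapA]
    rw [pvOp_word_false w t (fun x hx => hw x (List.mem_cons_of_mem c hx)) ht]

-- scanning a hyphen-joined list of clean words
theorem pvOp_hyphen (ps : List (List Char)) (t : List Char)
    (hps : ∀ p ∈ ps, ∀ x ∈ p, ¬(x = ' ' ∨ x = '-'))
    (ht : t = [] ∨ ∃ c t', t = c :: t' ∧ (c = ' ' ∨ c = '-')) :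
    pvOp (PySem.Chars.join ['-'] ps ++ t) true
      = PySem.Chars.join ['-'] (ps.map pvCapA) ++ pvOp t true := by
  induction ps with
  | nil => simp [PySem.Chars.join, List.intercalate]
  | cons p ps ih =>
    cases ps with
    | nil =>
      rw [List.map_cons, List.map_nil, pvJoin_singleton, pvJoin_singleton]
      exact pvOp_word_true p t (hps p (List.mem_cons_self ..)) ht
    | cons q qs =>
      rw [pvJoin_cons_cons, List.map_cons, List.map_cons, pvJoin_cons_cons, ← List.map_cons]
      have h1 : p ++ '-' :: PySem.Chars.join ['-'] (q :: qs) ++ t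
          = p ++ ('-' :: (PySem.Chars.join ['-'] (q :: qs) ++ t)) := by simp
      rw [h1, pvOp_word_true p _ (hps p (List.mem_cons_self ..))
        (Or.inr ⟨'-', _, rfl, Or.inr rfl⟩)]
      rw [show pvOp ('-' :: (PySem.Chars.join ['-'] (q :: qs) ++ t)) true
          = '-' :: pvOp (PySem.Chars.join ['-'] (q :: qs) ++ t) true from by
        simp [pvOp]]
      rw [ih (fun r hr => hps r (List.mem_cons_of_mem p hr))]
      simp

-- the word-level transform A applies to each space-separated word
def pvWordA (w : List Char) : List Char :=
  PySem.Chars.join ['-'] ((pvSplit '-' w).map pvCapA)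

-- scanning a space-joined list of words
theorem pvOp_space (ws : List (List Char)) (t : List Char)
    (hws : ∀ w ∈ ws, ' ' ∉ w)
    (ht : t = [] ∨ ∃ c t', t = c :: t' ∧ (c = ' ' ∨ c = '-')) :
    pvOp (PySem.Chars.join [' '] ws ++ t) true
      = PySem.Chars.join [' '] (ws.map pvWordA) ++ pvOp t true := by
  induction ws with
  | nil => simp [PySem.Chars.join, List.intercalate]
  | cons w ws ih =>
    have hclean : ∀ p ∈ pvSplit '-' w, ∀ x ∈ p, ¬(x = ' ' ∨ x = '-') := by
      intro p hp x hx
      rintro (rfl | rfl)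
      · exact hws w (List.mem_cons_self ..) (pvSplit_mem_sub '-' w p hp ' ' hx)
      · exact pvSplit_not_mem '-' w p hp hx
    cases ws with
    | nil =>
      rw [List.map_cons, List.map_nil, pvJoin_singleton, pvJoin_singleton]
      conv_lhs => rw [← pvJoin_split '-' w]
      exact pvOp_hyphen (pvSplit '-' w) t hclean ht
    | cons v vs =>
      rw [pvJoin_cons_cons, List.map_cons, List.map_cons, pvJoin_cons_cons, ← List.map_cons]
      have h1 : w ++ ' ' :: PySem.Chars.join [' '] (v :: vs) ++ t
          = w ++ (' ' :: (PySem.Chars.join [' '] (v :: vs) ++ t)) := by simp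
      have hw2 : pvOp (w ++ (' ' :: (PySem.Chars.join [' '] (v :: vs) ++ t))) true
          = pvWordA w ++ pvOp (' ' :: (PySem.Chars.join [' '] (v :: vs) ++ t)) true := by
        conv_lhs => rw [← pvJoin_split '-' w]
        exact pvOp_hyphen (pvSplit '-' w) _ hclean (Or.inr ⟨' ', _, rfl, Or.inl rfl⟩)
      rw [h1, hw2]
      rw [show pvOp (' ' :: (PySem.Chars.join [' '] (v :: vs) ++ t)) true
          = ' ' :: pvOp (PySem.Chars.join [' '] (v :: vs) ++ t) true from by
        simp [pvOp]]
      rw [ih (fun r hr => hws r (List.mem_cons_of_mem w hr))]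
      simp

-- A's foldl-append loop is a map
theorem pvFoldlA {α : Type} (P : α → Prop) [DecidablePred P] (f g : α → List Char)
    (ws : List α) (acc : List (List Char)) :
    ws.foldl (fun r w => if P w then r ++ [f w] else r ++ [g w]) acc
      = acc ++ ws.map (fun w => if P w then f w else g w) := by
  induction ws generalizing acc with
  | nil => simp
  | cons w ws ih =>
    by_cases h : P w
    · simp [h, ih]
    · simp [h, ih]

-- the branch A takes agrees with pvWordA on every word
theorem pvBranch_eq (w : List Char) :
    (if PySem.Chars.isIn ['-'] w = true then
       PySem.Chars.join ['-'] ((PySem.Chars.splitOn w ['-']).map pvCapA)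
     else pvCapA w) = pvWordA w := by
  by_cases h : PySem.Chars.isIn ['-'] w = true
  · simp [h, pvWordA, pvSplitOn_eq]
  · have hmem : '-' ∉ w := fun hm => h ((pvIsIn_singleton '-' w).mpr hm)
    simp only [h, pvWordA, pvSplit_of_not_mem '-' w hmem]
    simp [PySem.Chars.join, List.intercalate]

-- ===== VERDICT (by name: the statement is the Claim_ definition above) =====
theorem capitilize_fullname_py_spec : Claim_equal_capitilize_fullname_py := by
  intro name _
  unfold Spec_capitilize_fullname_py capitilize_fullname_py capitilize_fullname_py_alt
  apply congrArg String.ofList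
  rw [pvFoldl_eq_op name.toList [] true, List.nil_append]
  have hs : ∀ w ∈ pvSplit ' ' name.toList, ' ' ∉ w := pvSplit_not_mem ' ' name.toList
  have := pvOp_space (pvSplit ' ' name.toList) [] hs (Or.inl rfl)
  rw [pvJoin_split ' ' name.toList] at this
  simp only [List.append_nil, pvOp] at this
  rw [this]
  simp only [pvSplitOn_eq ' ' name.toList]
  rw [pvFoldlA (fun w => PySem.Chars.isIn ['-'] w = true)
      (fun w => PySem.Chars.join ['-'] ((PySem.Chars.splitOn w ['-']).map pvCapA))
      (fun w => pvCapA w) (pvSplit ' ' name.toList) []]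
  simp only [List.nil_append]
  congr 1
  exact List.map_congr_left (fun w _ => pvBranch_eq w)
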